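-- pv_equiv track=rewrite | github.com/muneebaifrah/Unstop-100-Days-Coding-Sprint | Day-66/3.Minimum_time_to_reach_the_End.py | minimum_time_to_clear_game
-- ===== SOURCE A (Python) =====
-- import heapq
--
-- def minimum_time_to_clear_game(matrix):
--     n = len(matrix)
--
--     pq = [(matrix[0][0], 0, 0)]  # (time, row, col)
--     visited = set()
--
--     directions = [(1,0),(-1,0),(0,1),(0,-1)]
--
--     while pq:
--         time, r, c = heapq.heappop(pq)
--
--         if (r, c) == (n-1, n-1):
--             return time
--
--         if (r, c) in visited:
--             continue
--
--         visited.add((r, c))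
--
--         for dr, dc in directions:
--             nr = r + dr
--             nc = c + dc
--
--             if 0 <= nr < n and 0 <= nc < n and (nr, nc) not in visited:
--                 new_time = max(time, matrix[nr][nc])
--                 heapq.heappush(pq, (new_time, nr, nc))
-- ===== SOURCE B (Python) =====
-- def _reachable(matrix, n, limit):
--     """DFS: can (n-1,n-1) be reached from (0,0) using only cells with value <= limit?"""
--     if matrix[0][0] > limit:
--         return False
--     seen = {(0, 0)}
--     stack = [(0, 0)]
--     while stack:
--         r, c = stack.pop()
--         if (r, c) == (n - 1, n - 1):
--             return True
--         for nr, nc in ((r + 1, c), (r - 1, c), (r, c + 1), (r, c - 1)):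
--             if 0 <= nr < n and 0 <= nc < n and (nr, nc) not in seen and matrix[nr][nc] <= limit:
--                 seen.add((nr, nc))
--                 stack.append((nr, nc))
--     return False
--
--
-- def minimum_time_to_clear_game(matrix):
--     n = len(matrix)
--     vals = sorted({v for row in matrix for v in row})
--     lo, hi = 0, len(vals) - 1
--     while lo < hi:
--         mid = (lo + hi) // 2
--         if _reachable(matrix, n, vals[mid]):
--             hi = mid
--         else:
--             lo = mid + 1
--     return vals[lo]
-- ===== Notes on version B (the rewrite author's own statement) =====
-- stated objective: alternative
-- what changed: Replaces Dijkstra's priority-queue frontier by a binary search over the sorted distinct cell values, probing each candidate threshold with a stack-based DFS restricted to cells with value <= threshold.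
-- outside the precondition, e.g. on minimum_time_to_clear_game([[0, 9, 9], [0, 9], [0, 0, 0]]): A returns 0, B returns 0
import Mathlib
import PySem

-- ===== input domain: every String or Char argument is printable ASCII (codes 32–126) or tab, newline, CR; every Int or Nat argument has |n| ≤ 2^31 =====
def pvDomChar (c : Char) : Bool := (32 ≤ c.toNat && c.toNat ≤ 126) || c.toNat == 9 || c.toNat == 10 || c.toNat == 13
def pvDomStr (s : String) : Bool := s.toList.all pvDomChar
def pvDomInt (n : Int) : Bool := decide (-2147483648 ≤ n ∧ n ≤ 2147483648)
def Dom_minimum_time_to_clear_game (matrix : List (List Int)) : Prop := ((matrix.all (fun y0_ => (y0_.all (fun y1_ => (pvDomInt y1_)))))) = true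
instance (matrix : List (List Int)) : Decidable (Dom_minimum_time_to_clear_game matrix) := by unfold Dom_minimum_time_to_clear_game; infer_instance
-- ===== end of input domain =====

-- B replaces A's Dijkstra priority-queue frontier by a binary search over the sorted distinct
-- cell values, probing each candidate threshold with a stack DFS over cells ≤ the threshold.

-- ===== PORT A =====

-- shared cell read: matrix[r][c] (total form; both ports only evaluate it at indices that are
-- in range on every input admitted by Pre_)
def pvVal (matrix : List (List Int)) (r c : Int) : Int :=
  PySem.List.pyGetD (PySem.List.pyGetD matrix r []) c 0

-- lexicographic '<' on the heap triples (time, row, col), as Python compares tuples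
def pvLt3 (a b : Int × Int × Int) : Bool :=
  decide (a.1 < b.1 ∨ (a.1 = b.1 ∧ (a.2.1 < b.2.1 ∨ (a.2.1 = b.2.1 ∧ a.2.2 < b.2.2))))

-- heapq.heappop: remove and return the smallest triple (observable behaviour of the heap)
def pvPopMin (pq : List (Int × Int × Int)) :
    Option ((Int × Int × Int) × List (Int × Int × Int)) :=
  match pq with
  | [] => none
  | x :: xs =>
    let m := xs.foldl (fun a b => if pvLt3 b a then b else a) x
    some (m, (x :: xs).erase m)

def pvDirs : List (Int × Int) := [(1, 0), (-1, 0), (0, 1), (0, -1)]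

-- the 'while pq' loop of A; fuel only makes the recursion structural (never exhausted under Pre_,
-- see the proofs); the Python returns None when pq empties, which cannot happen under Pre_
def pvALoop (matrix : List (List Int)) (n : Int) :
    Nat → List (Int × Int × Int) → List (Int × Int) → Int
  | 0, _, _ => 0
  | fuel + 1, pq, visited =>
    match pvPopMin pq with
    | none => 0
    | some ((t, r, c), pq') =>
      if (r, c) = (n - 1, n - 1) then t
      else if (r, c) ∈ visited then pvALoop matrix n fuel pq' visited
      else
        let visited' := PySem.Set.add visited (r, c)
        let pq'' := pvDirs.foldl (fun acc d =>
          if 0 ≤ r + d.1 ∧ r + d.1 < n ∧ 0 ≤ c + d.2 ∧ c + d.2 < n ∧ (r + d.1, c + d.2) ∉ visited'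
          then acc ++ [(max t (pvVal matrix (r + d.1) (c + d.2)), r + d.1, c + d.2)]
          else acc) pq'
        pvALoop matrix n fuel pq'' visited'

def minimum_time_to_clear_game (matrix : List (List Int)) : Int :=
  let n : Int := matrix.length
  pvALoop matrix n (5 * matrix.length * matrix.length + 5) [(pvVal matrix 0 0, 0, 0)] []

-- ===== PORT B =====

-- the 'while stack' DFS loop of _reachable; stack head = Python's stack top
def pvBDfs (matrix : List (List Int)) (n limit : Int) :
    Nat → List (Int × Int) → List (Int × Int) → Bool
  | 0, _, _ => false
  | fuel + 1, stack, seen =>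
    match stack with
    | [] => false
    | (r, c) :: rest =>
      if (r, c) = (n - 1, n - 1) then true
      else
        let st := [(r + 1, c), (r - 1, c), (r, c + 1), (r, c - 1)].foldl
          (fun (acc : List (Int × Int) × List (Int × Int)) q =>
            if 0 ≤ q.1 ∧ q.1 < n ∧ 0 ≤ q.2 ∧ q.2 < n ∧ q ∉ acc.1 ∧ pvVal matrix q.1 q.2 ≤ limit
            then (PySem.Set.add acc.1 q, q :: acc.2)
            else acc) (seen, rest)
        pvBDfs matrix n limit fuel st.2 st.1

-- _reachable(matrix, n, limit)
def pvBReachable (matrix : List (List Int)) (n limit : Int) : Bool :=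
  if pvVal matrix 0 0 > limit then false
  else pvBDfs matrix n limit (5 * matrix.length * matrix.length + 5)
    [((0 : Int), (0 : Int))] [((0 : Int), (0 : Int))]

-- the 'while lo < hi' binary-search loop
def pvBSearch (matrix : List (List Int)) (n : Int) (vals : List Int) (lo hi : Int) : Int :=
  if h : lo < hi then
    let mid := PySem.Int.floordiv (lo + hi) 2
    if pvBReachable matrix n (PySem.List.pyGetD vals mid 0) then
      pvBSearch matrix n vals lo mid
    else
      pvBSearch matrix n vals (mid + 1) hi
  else PySem.List.pyGetD vals lo 0
termination_by (hi - lo).toNat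
decreasing_by
  · have h2 : PySem.Int.floordiv (lo + hi) 2 < hi :=
      (PySem.Int.floordiv_lt_iff_lt_mul (a := lo + hi) (b := 2) (q := hi) (by omega)).2 (by omega)
    omega
  · have h1 := PySem.Int.floordiv_two_mid_bounds (le_of_lt h)
    omega

def minimum_time_to_clear_game_alt (matrix : List (List Int)) : Int :=
  let n : Int := matrix.length
  let vals := PySem.List.sorted (PySem.Set.ofList (matrix.flatMap (fun row => row))) (fun v => v) false
  pvBSearch matrix n vals 0 (vals.length - 1)

-- ===== PRECONDITION & SPEC =====
-- Pre_ excludes the empty matrix and ragged matrices with a row shorter than len(matrix): A's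
-- square-grid indexing matrix[nr][nc] raises IndexError on almost all such inputs, and in the rare
-- case where the search returns before touching a short row the value is an accident of traversal order.
def Pre_minimum_time_to_clear_game (matrix : List (List Int)) : Prop :=
  matrix ≠ [] ∧ ∀ row ∈ matrix, matrix.length ≤ row.length
instance (matrix : List (List Int)) : Decidable (Pre_minimum_time_to_clear_game matrix) := by
  unfold Pre_minimum_time_to_clear_game; infer_instance

def pvWitness_minimum_time_to_clear_game : List (List Int) := [[3, 1], [2, 0]]

def Spec_minimum_time_to_clear_game (matrix : List (List Int)) (out : Int) : Prop := out = minimum_time_to_clear_game_alt matrix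
instance (matrix : List (List Int)) (out : Int) : Decidable (Spec_minimum_time_to_clear_game matrix out) := by unfold Spec_minimum_time_to_clear_game; infer_instance

-- ===== CLAIM (what is proved, stated in full; the proofs are below) =====
def Claim_equal_minimum_time_to_clear_game : Prop := ∀ (matrix : List (List Int)), Dom_minimum_time_to_clear_game matrix → Pre_minimum_time_to_clear_game matrix → Spec_minimum_time_to_clear_game matrix (minimum_time_to_clear_game matrix)

-- ===== LEMMAS AND PROOFS =====

-- ---------- spec-side notions (used only by the proofs) ----------

def pvInGrid (n : Int) (p : Int × Int) : Prop :=
  0 ≤ p.1 ∧ p.1 < n ∧ 0 ≤ p.2 ∧ p.2 < n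

def pvNbr (p q : Int × Int) : Prop :=
  (q.1 = p.1 + 1 ∧ q.2 = p.2) ∨ (q.1 = p.1 - 1 ∧ q.2 = p.2) ∨
  (q.1 = p.1 ∧ q.2 = p.2 + 1) ∨ (q.1 = p.1 ∧ q.2 = p.2 - 1)

def pvAdj (matrix : List (List Int)) (n t : Int) (p q : Int × Int) : Prop :=
  pvInGrid n p ∧ pvInGrid n q ∧ pvVal matrix p.1 p.2 ≤ t ∧ pvVal matrix q.1 q.2 ≤ t ∧ pvNbr p q

-- "p is reachable from (0,0) using only cells of value ≤ t"
def pvGoodC (matrix : List (List Int)) (n t : Int) (p : Int × Int) : Prop :=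
  pvInGrid n p ∧ pvVal matrix 0 0 ≤ t ∧ pvVal matrix p.1 p.2 ≤ t ∧
    Relation.ReflTransGen (pvAdj matrix n t) (0, 0) p

def pvGood (matrix : List (List Int)) (n t : Int) : Prop :=
  pvGoodC matrix n t (n - 1, n - 1)

lemma pvAdj_mono {matrix : List (List Int)} {n t t' : Int} (h : t ≤ t') {p q : Int × Int}
    (ha : pvAdj matrix n t p q) : pvAdj matrix n t' p q := by
  obtain ⟨a, b, c, d, e⟩ := ha
  exact ⟨a, b, le_trans c h, le_trans d h, e⟩

lemma pvGoodC_mono {matrix : List (List Int)} {n t t' : Int} (h : t ≤ t') {p : Int × Int}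
    (hg : pvGoodC matrix n t p) : pvGoodC matrix n t' p := by
  obtain ⟨a, b, c, d⟩ := hg
  exact ⟨a, le_trans b h, le_trans c h, d.mono (fun _ _ hx => pvAdj_mono h hx)⟩

-- crossing lemma: a path from inside V to outside V crosses the boundary
lemma pv_crossing {α : Type} {A : α → α → Prop} {V : α → Prop} {a p : α}
    (h : Relation.ReflTransGen A a p) (ha : V a) (hp : ¬ V p) :
    ∃ u w, Relation.ReflTransGen A a u ∧ V u ∧ ¬ V w ∧ A u w ∧
      Relation.ReflTransGen A w p := by
  induction h using Relation.ReflTransGen.head_induction_on with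
  | refl => exact absurd ha hp
  | head hab _ ih =>
    rename_i x b _
    by_cases hb : V b
    · obtain ⟨u, w, h1, h2, h3, h4, h5⟩ := ih hb
      exact ⟨u, w, Relation.ReflTransGen.head hab h1, h2, h3, h4, h5⟩
    · exact ⟨x, b, Relation.ReflTransGen.refl, ha, hb, hab, by assumption⟩

lemma pv_closed {α : Type} {A : α → α → Prop} {V : α → Prop} {a p : α}
    (h : Relation.ReflTransGen A a p) (ha : V a)
    (hstep : ∀ u w, V u → A u w → V w) : V p := by
  induction h with
  | refl => exact ha
  | tail _ hcd ih => exact hstep _ _ ih hcd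

-- ---------- popMin facts ----------

lemma pvLt3_true_le {a b : Int × Int × Int} (h : pvLt3 a b = true) : a.1 ≤ b.1 := by
  simp [pvLt3] at h
  rcases h with h | ⟨h, _⟩ <;> omega

lemma pvLt3_false_le {a b : Int × Int × Int} (h : pvLt3 a b = false) : b.1 ≤ a.1 := by
  simp [pvLt3] at h
  omega

lemma pv_minfold (xs : List (Int × Int × Int)) : ∀ x : Int × Int × Int,
    (xs.foldl (fun a b => if pvLt3 b a then b else a) x = x ∨
      xs.foldl (fun a b => if pvLt3 b a then b else a) x ∈ xs) ∧
    (xs.foldl (fun a b => if pvLt3 b a then b else a) x).1 ≤ x.1 ∧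
    ∀ y ∈ xs, (xs.foldl (fun a b => if pvLt3 b a then b else a) x).1 ≤ y.1 := by
  induction xs with
  | nil => intro x; simp
  | cons b bs ih =>
    intro x
    simp only [List.foldl_cons]
    by_cases hb : pvLt3 b x = true
    · rw [if_pos hb]
      have hle := pvLt3_true_le hb
      obtain ⟨hm, hx, hy⟩ := ih b
      refine ⟨?_, le_trans hx hle, ?_⟩
      · rcases hm with h | h
        · exact Or.inr (by rw [h]; exact List.mem_cons_self)
        · exact Or.inr (List.mem_cons_of_mem _ h)
      · intro y hy'
        rcases List.mem_cons.1 hy' with rfl | hy''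
        · exact hx
        · exact hy y hy''
    · rw [if_neg hb]
      have hle := pvLt3_false_le (by simpa using hb)
      obtain ⟨hm, hx, hy⟩ := ih x
      refine ⟨?_, hx, ?_⟩
      · rcases hm with h | h
        · exact Or.inl h
        · exact Or.inr (List.mem_cons_of_mem _ h)
      · intro y hy'
        rcases List.mem_cons.1 hy' with rfl | hy''
        · exact le_trans hx hle
        · exact hy y hy''

lemma pvPopMin_none {pq : List (Int × Int × Int)} : pvPopMin pq = none ↔ pq = [] := by
  cases pq <;> simp [pvPopMin]

lemma pvPopMin_spec {pq pq' : List (Int × Int × Int)} {e : Int × Int × Int}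
    (h : pvPopMin pq = some (e, pq')) :
    e ∈ pq ∧ pq' = pq.erase e ∧ ∀ y ∈ pq, e.1 ≤ y.1 := by
  cases pq with
  | nil => simp [pvPopMin] at h
  | cons x xs =>
    simp only [pvPopMin, Option.some.injEq, Prod.mk.injEq] at h
    obtain ⟨he, hpq'⟩ := h
    obtain ⟨hm, hx, hy⟩ := pv_minfold xs x
    rw [he] at hm hx hy hpq' 
    refine ⟨?_, hpq'.symm, ?_⟩
    · rcases hm with h | h
      · rw [h]; exact List.mem_cons_self
      · exact List.mem_cons_of_mem _ h
    · intro y hy'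
      rcases List.mem_cons.1 hy' with rfl | hy''
      · exact hx
      · exact hy y hy''

-- ---------- counting: a nodup list of grid cells has at most n*n elements ----------

lemma pv_grid_card (n : Nat) (l : List (Int × Int)) (hnd : l.Nodup)
    (hg : ∀ p ∈ l, pvInGrid (n : Int) p) : l.length ≤ n * n := by
  classical
  have hsub : l.toFinset ⊆ (Finset.Icc (0:ℤ) (n-1)) ×ˢ (Finset.Icc (0:ℤ) (n-1)) := by
    intro p hp
    rw [List.mem_toFinset] at hp
    obtain ⟨h0, h1, h2, h3⟩ := hg p hp
    rw [Finset.mem_product, Finset.mem_Icc, Finset.mem_Icc]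
    omega
  have hcard := Finset.card_le_card hsub
  rw [Finset.card_product, Int.card_Icc] at hcard
  have hn : ((n:Int) - 1 + 1 - 0).toNat = n := by omega
  rw [hn] at hcard
  rw [← List.toFinset_card_of_nodup hnd]
  exact hcard

-- ---------- cell values ----------

lemma pvVal_mem_flat (matrix : List (List Int))
    (hPre : Pre_minimum_time_to_clear_game matrix) (r c : Int)
    (hg : pvInGrid (matrix.length : Int) (r, c)) :
    pvVal matrix r c ∈ matrix.flatMap (fun row => row) := by
  obtain ⟨h0, h1, h2, h3⟩ := hg
  simp only at h0 h1 h2 h3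
  have hr : r.toNat < matrix.length := by omega
  have hrow : matrix.length ≤ (matrix[r.toNat]).length :=
    hPre.2 _ (List.getElem_mem hr)
  have hc : c.toNat < (matrix[r.toNat]).length := by omega
  rw [pvVal, PySem.List.pyGetD_eq_getElem matrix [] h0 (by exact_mod_cast h1),
    PySem.List.pyGetD_eq_getElem _ 0 h2 (by exact_mod_cast lt_of_lt_of_le (by omega) (Nat.cast_le.2 hrow))]
  exact List.mem_flatMap.2 ⟨matrix[r.toNat], List.getElem_mem hr, List.getElem_mem hc⟩

-- ---------- neighbour enumeration ----------

lemma pv_mem_nbrList (r c : Int) (z : Int × Int) :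
    z ∈ [(r + 1, c), (r - 1, c), (r, c + 1), (r, c - 1)] ↔ pvNbr (r, c) z := by
  simp [pvNbr, Prod.ext_iff]

lemma pv_set_add {s : List (Int × Int)} {x : Int × Int} (h : x ∉ s) :
    PySem.Set.add s x = s ++ [x] := by
  simp [PySem.Set.add, PySem.Set.contains]
  intro hc
  exact absurd hc h

-- ---------- B: the neighbour fold of one DFS step ----------

lemma pvBFold (matrix : List (List Int)) (n limit : Int) :
    ∀ (L : List (Int × Int)) (sn st : List (Int × Int)), sn.Nodup →
    (∀ x, x ∈ (L.foldl
          (fun (acc : List (Int × Int) × List (Int × Int)) q =>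
            if 0 ≤ q.1 ∧ q.1 < n ∧ 0 ≤ q.2 ∧ q.2 < n ∧ q ∉ acc.1 ∧ pvVal matrix q.1 q.2 ≤ limit
            then (PySem.Set.add acc.1 q, q :: acc.2)
            else acc) (sn, st)).1 ↔
        x ∈ sn ∨ (x ∈ L ∧ pvInGrid n x ∧ pvVal matrix x.1 x.2 ≤ limit)) ∧
    (∀ x, x ∈ (L.foldl
          (fun (acc : List (Int × Int) × List (Int × Int)) q =>
            if 0 ≤ q.1 ∧ q.1 < n ∧ 0 ≤ q.2 ∧ q.2 < n ∧ q ∉ acc.1 ∧ pvVal matrix q.1 q.2 ≤ limit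
            then (PySem.Set.add acc.1 q, q :: acc.2)
            else acc) (sn, st)).2 ↔
        x ∈ st ∨ (x ∈ L ∧ (pvInGrid n x ∧ pvVal matrix x.1 x.2 ≤ limit) ∧ x ∉ sn)) ∧
    (L.foldl
          (fun (acc : List (Int × Int) × List (Int × Int)) q =>
            if 0 ≤ q.1 ∧ q.1 < n ∧ 0 ≤ q.2 ∧ q.2 < n ∧ q ∉ acc.1 ∧ pvVal matrix q.1 q.2 ≤ limit
            then (PySem.Set.add acc.1 q, q :: acc.2)
            else acc) (sn, st)).1.Nodup ∧
    ∃ k, (L.foldl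
          (fun (acc : List (Int × Int) × List (Int × Int)) q =>
            if 0 ≤ q.1 ∧ q.1 < n ∧ 0 ≤ q.2 ∧ q.2 < n ∧ q ∉ acc.1 ∧ pvVal matrix q.1 q.2 ≤ limit
            then (PySem.Set.add acc.1 q, q :: acc.2)
            else acc) (sn, st)).1.length = sn.length + k ∧
         (L.foldl
          (fun (acc : List (Int × Int) × List (Int × Int)) q =>
            if 0 ≤ q.1 ∧ q.1 < n ∧ 0 ≤ q.2 ∧ q.2 < n ∧ q ∉ acc.1 ∧ pvVal matrix q.1 q.2 ≤ limit
            then (PySem.Set.add acc.1 q, q :: acc.2)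
            else acc) (sn, st)).2.length = st.length + k := by
  intro L
  induction L with
  | nil =>
    intro sn st hnd
    refine ⟨by simp, by simp, hnd, 0, by simp⟩
  | cons q L' ih =>
    intro sn st hnd
    simp only [List.foldl_cons]
    by_cases hq : 0 ≤ q.1 ∧ q.1 < n ∧ 0 ≤ q.2 ∧ q.2 < n ∧ q ∉ sn ∧ pvVal matrix q.1 q.2 ≤ limit
    · rw [if_pos hq]
      obtain ⟨g1, g2, g3, g4, hqs, g5⟩ := hq
      have hGq : pvInGrid n q ∧ pvVal matrix q.1 q.2 ≤ limit := ⟨⟨g1, g2, g3, g4⟩, g5⟩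
      rw [pv_set_add hqs]
      have hdisj : sn.Disjoint [q] := by
        intro a ha hb
        rcases List.mem_cons.1 hb with rfl | hb
        · exact hqs ha
        · cases hb
      have hnd' : (sn ++ [q]).Nodup := List.Nodup.append hnd (List.nodup_singleton q) hdisj
      obtain ⟨i1, i2, i3, k, i4, i5⟩ := ih (sn ++ [q]) (q :: st) hnd'
      simp only [List.length_append, List.length_singleton] at i4
      simp only [List.length_cons] at i5
      refine ⟨?_, ?_, i3, k + 1, by omega, by omega⟩
      · intro x
        rw [i1 x]
        simp only [List.mem_append, List.mem_cons, List.not_mem_nil, or_false]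
        constructor
        · rintro ((h | h) | ⟨h1, h2⟩)
          · exact Or.inl h
          · exact Or.inr ⟨Or.inl h, h ▸ hGq⟩
          · exact Or.inr ⟨Or.inr h1, h2⟩
        · rintro (h | ⟨(h | h1), h2⟩)
          · exact Or.inl (Or.inl h)
          · exact Or.inl (Or.inr h)
          · exact Or.inr ⟨h1, h2⟩
      · intro x
        rw [i2 x]
        simp only [List.mem_cons, List.mem_append, List.not_mem_nil, or_false]
        constructor
        · rintro ((h | h) | ⟨h1, h2, h3⟩)
          · exact Or.inr ⟨Or.inl h, h ▸ hGq, h ▸ hqs⟩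
          · exact Or.inl h
          · exact Or.inr ⟨Or.inr h1, h2, fun hx => h3 (Or.inl hx)⟩
        · rintro (h | ⟨(h | h1), h2, h3⟩)
          · exact Or.inl (Or.inr h)
          · exact Or.inl (Or.inl h)
          · by_cases hxq : x = q
            · exact Or.inl (Or.inl hxq)
            · refine Or.inr ⟨h1, h2, fun hx => ?_⟩
              rcases hx with hx | hx
              · exact h3 hx
              · exact hxq hx
    · rw [if_neg hq]
      obtain ⟨i1, i2, i3, k, i4, i5⟩ := ih sn st hnd
      push_neg at hq
      refine ⟨?_, ?_, i3, k, i4, i5⟩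
      · intro x
        rw [i1 x]
        simp only [List.mem_cons]
        constructor
        · rintro (h | ⟨h1, h2⟩)
          · exact Or.inl h
          · exact Or.inr ⟨Or.inr h1, h2⟩
        · rintro (h | ⟨(h | h1), h2⟩)
          · exact Or.inl h
          · subst h
            obtain ⟨⟨g1, g2, g3, g4⟩, g5⟩ := h2
            by_cases hqs : x ∈ sn
            · exact Or.inl hqs
            · exact absurd g5 (not_le.2 (hq g1 g2 g3 g4 hqs))
          · exact Or.inr ⟨h1, h2⟩
      · intro x
        rw [i2 x]
        simp only [List.mem_cons]
        constructor
        · rintro (h | ⟨h1, h2, h3⟩)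
          · exact Or.inl h
          · exact Or.inr ⟨Or.inr h1, h2, h3⟩
        · rintro (h | ⟨(h | h1), h2, h3⟩)
          · exact Or.inl h
          · subst h
            obtain ⟨⟨g1, g2, g3, g4⟩, g5⟩ := h2
            exact absurd g5 (not_le.2 (hq g1 g2 g3 g4 h3))
          · exact Or.inr ⟨h1, h2, h3⟩

-- ---------- B: DFS soundness & completeness ----------

lemma pvBDfs_not_good (matrix : List (List Int)) (limit : Int) (seen : List (Int × Int))
    (hcl : ∀ y ∈ seen, ∀ z, pvInGrid (matrix.length : Int) z → pvNbr y z →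
        pvVal matrix z.1 z.2 ≤ limit → z ∈ seen)
    (hstart : ((0 : Int), (0 : Int)) ∈ seen)
    (htgt : (((matrix.length : Int) - 1, (matrix.length : Int) - 1) : Int × Int) ∉ seen) :
    ¬ pvGood matrix (matrix.length : Int) limit := by
  rintro ⟨hgrid, h00, hvt, hrtg⟩
  exact htgt (pv_closed hrtg hstart
    (fun u w hu huw => hcl u hu w huw.2.1 huw.2.2.2.2 huw.2.2.2.1))

lemma pvBDfs_main (matrix : List (List Int)) (limit : Int) :
    ∀ (fuel : Nat) (stack seen : List (Int × Int)),
    5 * (matrix.length * matrix.length - seen.length) + stack.length ≤ fuel →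
    (∀ p ∈ stack, p ∈ seen) →
    (∀ p ∈ seen, pvGoodC matrix (matrix.length : Int) limit p) →
    (∀ y ∈ seen, y ∉ stack → ∀ z, pvInGrid (matrix.length : Int) z → pvNbr y z →
        pvVal matrix z.1 z.2 ≤ limit → z ∈ seen) →
    seen.Nodup →
    ((((matrix.length : Int) - 1, (matrix.length : Int) - 1) : Int × Int) ∈ seen →
      (((matrix.length : Int) - 1, (matrix.length : Int) - 1) : Int × Int) ∈ stack) →
    ((0 : Int), (0 : Int)) ∈ seen →
    (pvBDfs matrix (matrix.length : Int) limit fuel stack seen = true ↔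
      pvGood matrix (matrix.length : Int) limit) := by
  intro fuel
  induction fuel with
  | zero =>
    intro stack seen hfuel hss hseen hcl hnd htg hstart
    have hstack : stack = [] := by
      have : stack.length = 0 := by omega
      exact List.length_eq_zero_iff.1 this
    subst hstack
    simp only [pvBDfs, Bool.false_eq_true, false_iff]
    exact pvBDfs_not_good matrix limit seen
      (fun y hy z => hcl y hy (List.not_mem_nil) z)
      hstart (fun ht => (List.not_mem_nil) (htg ht))
  | succ fuel ih =>
    intro stack seen hfuel hss hseen hcl hnd htg hstart
    cases stack with
    | nil =>
      simp only [pvBDfs, Bool.false_eq_true, false_iff]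
      exact pvBDfs_not_good matrix limit seen
        (fun y hy z => hcl y hy (List.not_mem_nil) z)
        hstart (fun ht => (List.not_mem_nil) (htg ht))
    | cons hd rest =>
      obtain ⟨r, c⟩ := hd
      by_cases htarget : ((r : Int), (c : Int)) = (((matrix.length : Int) - 1, (matrix.length : Int) - 1) : Int × Int)
      · simp only [pvBDfs, if_pos htarget, true_iff]
        have := hseen (r, c) (hss _ List.mem_cons_self)
        rw [htarget] at this
        exact this
      · simp only [pvBDfs, if_neg htarget]
        obtain ⟨f1, f2, f3, k, f4, f5⟩ :=
          pvBFold matrix (matrix.length : Int) limit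
            [(r + 1, c), (r - 1, c), (r, c + 1), (r, c - 1)] seen rest hnd
        have hrc_seen : (r, c) ∈ seen := hss _ List.mem_cons_self
        obtain ⟨grc, v00rc, vrc, rtgrc⟩ := hseen (r, c) hrc_seen
        apply ih
        · -- fuel
          have hcard : seen.length + k ≤ matrix.length * matrix.length := by
            rw [← f4]
            apply pv_grid_card _ _ f3
            intro p hp
            rcases (f1 p).1 hp with h | ⟨_, hg, _⟩
            · exact (hseen p h).1
            · exact hg
          simp only [List.length_cons] at hfuel
          rw [f4, f5]
          omega
        · -- stack ⊆ seen
          intro p hp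
          rcases (f2 p).1 hp with h | ⟨h1, h2, h3⟩
          · exact (f1 p).2 (Or.inl (hss p (List.mem_cons_of_mem _ h)))
          · exact (f1 p).2 (Or.inr ⟨h1, h2⟩)
        · -- seen elements are reachable
          intro p hp
          rcases (f1 p).1 hp with h | ⟨hmem, hg, hv⟩
          · exact hseen p h
          · refine ⟨hg, v00rc, hv, rtgrc.tail ⟨grc, hg, vrc, hv, (pv_mem_nbrList r c p).1 hmem⟩⟩
        · -- closure outside the stack
          intro y hy hyst z hzg hznbr hzv
          by_cases hys : y ∈ seen
          · by_cases hyrc : y = (r, c)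
            · subst hyrc
              exact (f1 z).2 (Or.inr ⟨(pv_mem_nbrList r c z).2 hznbr, hzg, hzv⟩)
            · have hyrest : y ∉ rest := fun h => hyst ((f2 y).2 (Or.inl h))
              have : y ∉ (r, c) :: rest := by
                intro h
                rcases List.mem_cons.1 h with h | h
                · exact hyrc h
                · exact hyrest h
              exact (f1 z).2 (Or.inl (hcl y hys this z hzg hznbr hzv))
          · rcases (f1 y).1 hy with h | ⟨h1, h2, h3⟩
            · exact absurd h hys
            · exact absurd ((f2 y).2 (Or.inr ⟨h1, ⟨h2, h3⟩, hys⟩)) hyst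
        · exact f3
        · -- target in seen → target in stack
          intro ht
          by_cases hts : (((matrix.length : Int) - 1, (matrix.length : Int) - 1) : Int × Int) ∈ seen
          · have := htg hts
            rcases List.mem_cons.1 this with h | h
            · exact absurd h.symm (by simpa using htarget)
            · exact (f2 _).2 (Or.inl h)
          · rcases (f1 _).1 ht with h | ⟨h1, h2, h3⟩
            · exact absurd h hts
            · exact (f2 _).2 (Or.inr ⟨h1, ⟨h2, h3⟩, hts⟩)
        · exact (f1 _).2 (Or.inl hstart)

lemma pvBReachable_iff (matrix : List (List Int))
    (hPre : Pre_minimum_time_to_clear_game matrix) (limit : Int) :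
    (pvBReachable matrix (matrix.length : Int) limit = true ↔
      pvGood matrix (matrix.length : Int) limit) := by
  have hn : 1 ≤ matrix.length := List.length_pos_iff.2 hPre.1
  by_cases h00 : pvVal matrix 0 0 > limit
  · rw [pvBReachable, if_pos h00]
    simp only [Bool.false_eq_true, false_iff]
    rintro ⟨_, hv, _, _⟩
    omega
  · rw [pvBReachable, if_neg h00]
    apply pvBDfs_main
    · simp only [List.length_cons, List.length_nil]
      rw [Nat.mul_assoc]
      omega
    · intro p hp
      simpa using hp
    · intro p hp
      simp only [List.mem_cons, List.not_mem_nil, or_false] at hp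
      subst hp
      have hg : pvInGrid (matrix.length : Int) ((0 : Int), (0 : Int)) := by
        show (0 : Int) ≤ (0 : Int) ∧ (0 : Int) < (matrix.length : Int) ∧
          (0 : Int) ≤ (0 : Int) ∧ (0 : Int) < (matrix.length : Int)
        refine ⟨le_refl _, by omega, le_refl _, by omega⟩
      refine ⟨hg, ?_, ?_, Relation.ReflTransGen.refl⟩
      · show pvVal matrix 0 0 ≤ limit
        omega
      · show pvVal matrix 0 0 ≤ limit
        omega
    · intro y hy hyst
      exfalso
      apply hyst
      simpa using hy
    · exact List.nodup_singleton _
    · intro h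
      simpa using h
    · exact List.mem_singleton.2 rfl

-- ---------- connectivity at the maximal value, path-max extraction ----------

set_option maxHeartbeats 1000000 in
lemma pv_conn (matrix : List (List Int)) (hPre : Pre_minimum_time_to_clear_game matrix) (M : Int)
    (hval : ∀ p : Int × Int, pvInGrid (matrix.length : Int) p → pvVal matrix p.1 p.2 ≤ M) :
    pvGood matrix (matrix.length : Int) M := by
  have hn : 1 ≤ matrix.length := List.length_pos_iff.2 hPre.1
  have hcol : ∀ i : Int, 0 ≤ i → i < (matrix.length : Int) →
      Relation.ReflTransGen (pvAdj matrix (matrix.length : Int) M) (0, 0) (i, 0) := by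
    intro i hi
    induction i, hi using Int.le_induction with
    | base => intro _; exact Relation.ReflTransGen.refl
    | succ i hi ih =>
      intro hlt
      have hi' : i < (matrix.length : Int) := by omega
      have g1 : pvInGrid (matrix.length : Int) (i, 0) := by
        show 0 ≤ i ∧ i < (matrix.length : Int) ∧ (0 : Int) ≤ 0 ∧ (0 : Int) < (matrix.length : Int)
        refine ⟨hi, hi', le_refl _, by omega⟩
      have g2 : pvInGrid (matrix.length : Int) (i + 1, 0) := by
        show 0 ≤ i + 1 ∧ i + 1 < (matrix.length : Int) ∧ (0 : Int) ≤ 0 ∧ (0 : Int) < (matrix.length : Int)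
        refine ⟨by omega, hlt, le_refl _, by omega⟩
      exact (ih hi').tail ⟨g1, g2, hval _ g1, hval _ g2, Or.inl ⟨rfl, rfl⟩⟩
  have hrow : ∀ j : Int, 0 ≤ j → j < (matrix.length : Int) →
      Relation.ReflTransGen (pvAdj matrix (matrix.length : Int) M) (0, 0)
        ((matrix.length : Int) - 1, j) := by
    intro j hj
    induction j, hj using Int.le_induction with
    | base => intro _; exact hcol ((matrix.length : Int) - 1) (by omega) (by omega)
    | succ j hj ih =>
      intro hlt
      have hj' : j < (matrix.length : Int) := by omega
      have g1 : pvInGrid (matrix.length : Int) ((matrix.length : Int) - 1, j) := by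
        show (0 : Int) ≤ (matrix.length : Int) - 1 ∧ (matrix.length : Int) - 1 < (matrix.length : Int) ∧
          0 ≤ j ∧ j < (matrix.length : Int)
        refine ⟨by omega, by omega, hj, hj'⟩
      have g2 : pvInGrid (matrix.length : Int) ((matrix.length : Int) - 1, j + 1) := by
        show (0 : Int) ≤ (matrix.length : Int) - 1 ∧ (matrix.length : Int) - 1 < (matrix.length : Int) ∧
          0 ≤ j + 1 ∧ j + 1 < (matrix.length : Int)
        refine ⟨by omega, by omega, by omega, hlt⟩
      exact (ih hj').tail ⟨g1, g2, hval _ g1, hval _ g2, Or.inr (Or.inr (Or.inl ⟨rfl, rfl⟩))⟩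
  have gt : pvInGrid (matrix.length : Int) ((matrix.length : Int) - 1, (matrix.length : Int) - 1) := by
    show (0 : Int) ≤ (matrix.length : Int) - 1 ∧ (matrix.length : Int) - 1 < (matrix.length : Int) ∧
      (0 : Int) ≤ (matrix.length : Int) - 1 ∧ (matrix.length : Int) - 1 < (matrix.length : Int)
    refine ⟨by omega, by omega, by omega, by omega⟩
  have g00 : pvInGrid (matrix.length : Int) ((0 : Int), (0 : Int)) := by
    show (0 : Int) ≤ 0 ∧ (0 : Int) < (matrix.length : Int) ∧ (0 : Int) ≤ 0 ∧ (0 : Int) < (matrix.length : Int)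
    refine ⟨le_refl _, by omega, le_refl _, by omega⟩
  exact ⟨gt, hval _ g00, hval _ gt, hrow ((matrix.length : Int) - 1) (by omega) (by omega)⟩

lemma pv_extract (matrix : List (List Int)) (hPre : Pre_minimum_time_to_clear_game matrix)
    (s : Int) (p : Int × Int)
    (hrtg : Relation.ReflTransGen (pvAdj matrix (matrix.length : Int) s) (0, 0) p)
    (h00 : pvVal matrix 0 0 ≤ s) :
    ∃ m, m ∈ matrix.flatMap (fun row => row) ∧ m ≤ s ∧ pvVal matrix 0 0 ≤ m ∧
      pvVal matrix p.1 p.2 ≤ m ∧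
      Relation.ReflTransGen (pvAdj matrix (matrix.length : Int) m) (0, 0) p := by
  have hn : 1 ≤ matrix.length := List.length_pos_iff.2 hPre.1
  have g00 : pvInGrid (matrix.length : Int) ((0 : Int), (0 : Int)) := by
    show (0 : Int) ≤ 0 ∧ (0 : Int) < (matrix.length : Int) ∧ (0 : Int) ≤ 0 ∧ (0 : Int) < (matrix.length : Int)
    refine ⟨le_refl _, by omega, le_refl _, by omega⟩
  induction hrtg with
  | refl =>
    exact ⟨pvVal matrix 0 0, pvVal_mem_flat matrix hPre 0 0 g00, h00, le_refl _, le_refl _,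
      Relation.ReflTransGen.refl⟩
  | tail hab hbc ih =>
    rename_i b cc
    obtain ⟨m, hm1, hm2, hm3, hm4, hm5⟩ := ih
    obtain ⟨gb, gc, vb, vc, nb⟩ := hbc
    refine ⟨max m (pvVal matrix cc.1 cc.2), ?_, max_le hm2 vc, le_trans hm3 (le_max_left _ _),
      le_max_right _ _, ?_⟩
    · rcases le_total (pvVal matrix cc.1 cc.2) m with h | h
      · rw [max_eq_left h]; exact hm1
      · rw [max_eq_right h]
        exact pvVal_mem_flat matrix hPre cc.1 cc.2 gc
    · exact (hm5.mono (fun _ _ hx => pvAdj_mono (le_max_left _ _) hx)).tail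
        ⟨gb, gc, le_trans hm4 (le_max_left _ _), le_max_right _ _, nb⟩

-- good states restricted to values occurring in the matrix
lemma pv_good_extract (matrix : List (List Int)) (hPre : Pre_minimum_time_to_clear_game matrix)
    (s : Int) (hs : pvGood matrix (matrix.length : Int) s) :
    ∃ m, m ∈ matrix.flatMap (fun row => row) ∧ m ≤ s ∧
      pvGood matrix (matrix.length : Int) m := by
  obtain ⟨hg, h00, hvt, hrtg⟩ := hs
  obtain ⟨m, hm1, hm2, hm3, hm4, hm5⟩ := pv_extract matrix hPre s _ hrtg h00
  exact ⟨m, hm1, hm2, hg, hm3, hm4, hm5⟩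

-- ---------- neighbours vs. the direction list ----------

lemma pv_dirs_nbr {d : Int × Int} (hd : d ∈ pvDirs) (a b : Int) :
    pvNbr (a, b) (a + d.1, b + d.2) := by
  fin_cases hd <;> simp [pvNbr] <;> omega

lemma pv_nbr_dirs {a b : Int} {z : Int × Int} (h : pvNbr (a, b) z) :
    ∃ d ∈ pvDirs, z = (a + d.1, b + d.2) := by
  obtain ⟨z1, z2⟩ := z
  rcases h with ⟨h1, h2⟩ | ⟨h1, h2⟩ | ⟨h1, h2⟩ | ⟨h1, h2⟩ <;> dsimp only at h1 h2
  · exact ⟨(1, 0), by simp [pvDirs], by simp [Prod.ext_iff]; omega⟩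
  · exact ⟨(-1, 0), by simp [pvDirs], by simp [Prod.ext_iff]; omega⟩
  · exact ⟨(0, 1), by simp [pvDirs], by simp [Prod.ext_iff]; omega⟩
  · exact ⟨(0, -1), by simp [pvDirs], by simp [Prod.ext_iff]; omega⟩

-- ---------- B: the binary search returns the first reachable candidate ----------

lemma pvBSearch_char (matrix : List (List Int)) (vals : List Int)
    (hmono : ∀ i j : Int, 0 ≤ i → i ≤ j → j < (vals.length : Int) →
      pvBReachable matrix (matrix.length : Int) (PySem.List.pyGetD vals i 0) = true →
      pvBReachable matrix (matrix.length : Int) (PySem.List.pyGetD vals j 0) = true) :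
    ∀ (k : Nat) (lo hi : Int), (hi - lo).toNat ≤ k → 0 ≤ lo → lo ≤ hi → hi < (vals.length : Int) →
    pvBReachable matrix (matrix.length : Int) (PySem.List.pyGetD vals hi 0) = true →
    (∀ i : Int, 0 ≤ i → i < lo →
      pvBReachable matrix (matrix.length : Int) (PySem.List.pyGetD vals i 0) = false) →
    ∃ j : Int, 0 ≤ j ∧ j < (vals.length : Int) ∧
      pvBSearch matrix (matrix.length : Int) vals lo hi = PySem.List.pyGetD vals j 0 ∧
      pvBReachable matrix (matrix.length : Int) (PySem.List.pyGetD vals j 0) = true ∧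
      (∀ i : Int, 0 ≤ i → i < j →
        pvBReachable matrix (matrix.length : Int) (PySem.List.pyGetD vals i 0) = false) := by
  intro k
  induction k with
  | zero =>
    intro lo hi hk h0 hlh hhi htop hbelow
    have hle : hi = lo := by omega
    subst hle
    rw [pvBSearch, dif_neg (by omega)]
    exact ⟨hi, h0, hhi, rfl, htop, hbelow⟩
  | succ k ihk =>
    intro lo hi hk h0 hlh hhi htop hbelow
    by_cases hlt : lo < hi
    · obtain ⟨hm1, hm2⟩ := PySem.Int.floordiv_two_mid_bounds (le_of_lt hlt)
      have hmidlt : PySem.Int.floordiv (lo + hi) 2 < hi :=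
        (PySem.Int.floordiv_lt_iff_lt_mul (by omega)).2 (by omega)
      rw [pvBSearch, dif_pos hlt]
      generalize hg : PySem.Int.floordiv (lo + hi) 2 = mid at hm1 hm2 hmidlt ⊢
      by_cases hr : pvBReachable matrix (matrix.length : Int)
          (PySem.List.pyGetD vals mid 0) = true
      · rw [if_pos hr]
        exact ihk lo mid (by omega) h0 (by omega) (by omega) hr hbelow
      · rw [if_neg hr]
        refine ihk (mid + 1) hi (by omega) (by omega) (by omega) hhi htop ?_
        intro i hi0 hilt
        by_cases hio : i < lo
        · exact hbelow i hi0 hio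
        · rcases hb : pvBReachable matrix (matrix.length : Int) (PySem.List.pyGetD vals i 0) with _ | _
          · rfl
          · have hx1 : i ≤ mid := by omega
            have hx2 : mid < (vals.length : Int) := by omega
            exact absurd (hmono i mid hi0 hx1 hx2 hb) hr
    · have hle : hi = lo := by omega
      subst hle
      rw [pvBSearch, dif_neg (by omega)]
      exact ⟨hi, h0, hhi, rfl, htop, hbelow⟩

-- ---------- B: full characterisation of the returned value ----------

lemma pvAlt_char (matrix : List (List Int)) (hPre : Pre_minimum_time_to_clear_game matrix) :
    pvGood matrix (matrix.length : Int) (minimum_time_to_clear_game_alt matrix) ∧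
    ∀ s, pvGood matrix (matrix.length : Int) s → minimum_time_to_clear_game_alt matrix ≤ s := by
  have hn : 1 ≤ matrix.length := List.length_pos_iff.2 hPre.1
  have g00 : pvInGrid (matrix.length : Int) ((0 : Int), (0 : Int)) := by
    show (0 : Int) ≤ 0 ∧ (0 : Int) < (matrix.length : Int) ∧ (0 : Int) ≤ 0 ∧ (0 : Int) < (matrix.length : Int)
    refine ⟨le_refl _, by omega, le_refl _, by omega⟩
  have key : ∀ (vals : List Int),
      vals = PySem.List.sorted (PySem.Set.ofList (matrix.flatMap (fun row => row))) (fun v => v) false →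
      pvGood matrix (matrix.length : Int)
        (pvBSearch matrix (matrix.length : Int) vals 0 ((vals.length : Int) - 1)) ∧
      ∀ s, pvGood matrix (matrix.length : Int) s →
        pvBSearch matrix (matrix.length : Int) vals 0 ((vals.length : Int) - 1) ≤ s := by
    intro vals hv
    have hlt : vals.Pairwise (· < ·) := by
      rw [hv]; exact PySem.List.sorted_ofList_pairwise_lt _
    have hle : vals.Pairwise (· ≤ ·) := hlt.imp (fun h => le_of_lt h)
    have hgm := List.pairwise_iff_getElem.1 hle
    have hmem : ∀ v : Int, v ∈ vals ↔ v ∈ matrix.flatMap (fun row => row) := by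
      intro v
      rw [hv, PySem.List.mem_sorted, PySem.Set.mem_ofList]
    have hv00 : pvVal matrix 0 0 ∈ vals :=
      (hmem _).2 (pvVal_mem_flat matrix hPre 0 0 g00)
    have hlen : 1 ≤ vals.length := List.length_pos_of_mem hv00
    have htopnat : ((vals.length : Int) - 1).toNat < vals.length := by omega
    have htopeq : PySem.List.pyGetD vals ((vals.length : Int) - 1) 0 =
        vals[((vals.length : Int) - 1).toNat] :=
      PySem.List.pyGetD_eq_getElem vals 0 (by omega) (by omega)
    have hmax : ∀ v ∈ vals, v ≤ PySem.List.pyGetD vals ((vals.length : Int) - 1) 0 := by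
      intro v hvm
      obtain ⟨i, hi, rfl⟩ := List.mem_iff_getElem.1 hvm
      rw [htopeq]
      by_cases hitop : i = ((vals.length : Int) - 1).toNat
      · subst hitop; exact le_refl _
      · exact hgm i _ hi htopnat (by omega)
    have htopGood : pvGood matrix (matrix.length : Int)
        (PySem.List.pyGetD vals ((vals.length : Int) - 1) 0) := by
      apply pv_conn matrix hPre
      intro p hp
      exact hmax _ ((hmem _).2 (pvVal_mem_flat matrix hPre p.1 p.2 hp))
    have htop : pvBReachable matrix (matrix.length : Int)
        (PySem.List.pyGetD vals ((vals.length : Int) - 1) 0) = true :=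
      (pvBReachable_iff matrix hPre _).2 htopGood
    have hmono : ∀ i j : Int, 0 ≤ i → i ≤ j → j < (vals.length : Int) →
        pvBReachable matrix (matrix.length : Int) (PySem.List.pyGetD vals i 0) = true →
        pvBReachable matrix (matrix.length : Int) (PySem.List.pyGetD vals j 0) = true := by
      intro i j hi0 hij hjlen hri
      have hij' : PySem.List.pyGetD vals i 0 ≤ PySem.List.pyGetD vals j 0 := by
        rw [PySem.List.pyGetD_eq_getElem vals 0 hi0 (by omega),
          PySem.List.pyGetD_eq_getElem vals 0 (by omega) hjlen]
        by_cases he : i = j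
        · subst he; exact le_refl _
        · exact hgm i.toNat j.toNat (by omega) (by omega) (by omega)
      exact (pvBReachable_iff matrix hPre _).2
        (pvGoodC_mono hij' ((pvBReachable_iff matrix hPre _).1 hri))
    obtain ⟨j, hj0, hjlen, heq, hjr, hjmin⟩ :=
      pvBSearch_char matrix vals hmono vals.length 0 ((vals.length : Int) - 1)
        (by omega) (le_refl _) (by omega) (by omega) htop
        (fun i hi0 hilt => absurd hi0 (by omega))
    rw [heq]
    refine ⟨(pvBReachable_iff matrix hPre _).1 hjr, ?_⟩
    intro s hs
    obtain ⟨m, hmflat, hms, hmgood⟩ := pv_good_extract matrix hPre s hs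
    obtain ⟨i, hi, hieq⟩ := List.mem_iff_getElem.1 ((hmem m).2 hmflat)
    have hri : pvBReachable matrix (matrix.length : Int)
        (PySem.List.pyGetD vals (i : Int) 0) = true := by
      rw [PySem.List.pyGetD_eq_getElem vals 0 (by omega) (by exact_mod_cast hi)]
      simp only [Int.toNat_natCast]
      rw [hieq]
      exact (pvBReachable_iff matrix hPre _).2 hmgood
    have hji : ¬ ((i : Int) < j) := by
      intro hij
      rw [hjmin (i : Int) (by omega) hij] at hri
      simp at hri
    have hj' : PySem.List.pyGetD vals j 0 ≤ m := by
      rw [PySem.List.pyGetD_eq_getElem vals 0 hj0 hjlen, ← hieq]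
      by_cases he : j.toNat = i
      · subst he
        exact le_refl _
      · exact hgm j.toNat i (by omega) hi (by omega)
    exact le_trans hj' hms
  have halt : minimum_time_to_clear_game_alt matrix =
      pvBSearch matrix (matrix.length : Int)
        (PySem.List.sorted (PySem.Set.ofList (matrix.flatMap (fun row => row))) (fun v => v) false) 0
        (((PySem.List.sorted (PySem.Set.ofList (matrix.flatMap (fun row => row))) (fun v => v) false).length : Int) - 1) := rfl
  rw [halt]
  exact key _ rfl

-- ---------- A: the Dijkstra loop returns the least threshold ----------

set_option maxHeartbeats 2000000 in
lemma pvALoop_main (matrix : List (List Int))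
    (hex : ∃ s0, pvGood matrix (matrix.length : Int) s0) :
    ∀ (fuel : Nat) (pq : List (Int × Int × Int)) (visited : List (Int × Int)),
    5 * (matrix.length * matrix.length - visited.length) + pq.length ≤ fuel →
    (∀ e ∈ pq, pvGoodC matrix (matrix.length : Int) e.1 (e.2.1, e.2.2)) →
    (∀ (s : Int) (p : Int × Int), pvGoodC matrix (matrix.length : Int) s p → p ∉ visited →
        ∃ e ∈ pq, e.1 ≤ s ∧ ((e.2.1, e.2.2) : Int × Int) ∉ visited ∧
          Relation.ReflTransGen (pvAdj matrix (matrix.length : Int) s) (e.2.1, e.2.2) p) →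
    (∀ y ∈ visited, ∀ z : Int × Int, z ∉ visited → pvInGrid (matrix.length : Int) z → pvNbr y z →
        ∀ s : Int, pvGoodC matrix (matrix.length : Int) s y → pvVal matrix z.1 z.2 ≤ s →
          ∃ e ∈ pq, e.1 ≤ s ∧ ((e.2.1, e.2.2) : Int × Int) = z) →
    visited.Nodup →
    (∀ p ∈ visited, pvInGrid (matrix.length : Int) p) →
    ((((matrix.length : Int) - 1, (matrix.length : Int) - 1) : Int × Int) ∉ visited) →
    pvGood matrix (matrix.length : Int) (pvALoop matrix (matrix.length : Int) fuel pq visited) ∧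
    ∀ s, pvGood matrix (matrix.length : Int) s →
      pvALoop matrix (matrix.length : Int) fuel pq visited ≤ s := by
  intro fuel
  induction fuel with
  | zero =>
    intro pq visited hfuel h1 h3 hP hnd hsub htgt
    exfalso
    obtain ⟨s0, hs0⟩ := hex
    obtain ⟨e, he, -⟩ := h3 s0 _ hs0 htgt
    have : pq.length = 0 := by omega
    rw [List.length_eq_zero_iff.1 this] at he
    exact List.not_mem_nil he
  | succ fuel ih =>
    intro pq visited hfuel h1 h3 hP hnd hsub htgt
    rcases hpop : pvPopMin pq with - | ⟨⟨t, a, b⟩, pq'⟩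
    · exfalso
      obtain ⟨s0, hs0⟩ := hex
      obtain ⟨e, he, -⟩ := h3 s0 _ hs0 htgt
      rw [pvPopMin_none.1 hpop] at he
      exact List.not_mem_nil he
    · obtain ⟨hmem, herase, hmin⟩ := pvPopMin_spec hpop
      have hGt : pvGoodC matrix (matrix.length : Int) t ((a : Int), (b : Int)) := h1 _ hmem
      simp only [pvALoop, hpop]
      by_cases htar : ((a : Int), (b : Int)) =
          ((((matrix.length : Int) - 1, (matrix.length : Int) - 1)) : Int × Int)
      · rw [if_pos htar]
        constructor
        · show pvGoodC matrix (matrix.length : Int) t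
              ((matrix.length : Int) - 1, (matrix.length : Int) - 1)
          exact htar ▸ hGt
        · intro s hs
          obtain ⟨e, he, hle, -, -⟩ := h3 s _ hs htgt
          exact le_trans (hmin e he) hle
      · rw [if_neg htar]
        by_cases hvis : (((a : Int), (b : Int)) : Int × Int) ∈ visited
        · rw [if_pos hvis]
          refine ih pq' visited ?_ ?_ ?_ ?_ hnd hsub htgt
          · have h1e := List.length_erase_of_mem hmem
            have hpos : 0 < pq.length := List.length_pos_of_mem hmem
            rw [herase]
            omega
          · intro e he
            rw [herase] at he
            exact h1 e (List.mem_of_mem_erase he)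
          · intro s p hsp hpv
            obtain ⟨e, he, hle, hcell, hrtg⟩ := h3 s p hsp hpv
            refine ⟨e, ?_, hle, hcell, hrtg⟩
            rw [herase]
            refine (List.mem_erase_of_ne ?_).2 he
            intro heq
            rw [heq] at hcell
            exact hcell hvis
          · intro y hy z hz hzg hznbr s hsy hzv
            obtain ⟨e, he, hle, hcell⟩ := hP y hy z hz hzg hznbr s hsy hzv
            refine ⟨e, ?_, hle, hcell⟩
            rw [herase]
            refine (List.mem_erase_of_ne ?_).2 he
            intro heq
            rw [heq] at hcell
            rw [← hcell] at hz
            exact hz hvis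
        · rw [if_neg hvis]
          simp only [pv_set_add hvis]
          rw [PySem.List.foldl_append_ite
            (p := fun d : Int × Int =>
              0 ≤ a + d.1 ∧ a + d.1 < (matrix.length : Int) ∧ 0 ≤ b + d.2 ∧
                b + d.2 < (matrix.length : Int) ∧
                (((a + d.1, b + d.2)) : Int × Int) ∉ visited ++ [((a : Int), (b : Int))])
            (f := fun d : Int × Int =>
              ((max t (pvVal matrix (a + d.1) (b + d.2)), a + d.1, b + d.2) : Int × Int × Int))]
          have hgab : pvInGrid (matrix.length : Int) ((a : Int), (b : Int)) := hGt.1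
          have hopt : ∀ s : Int, pvGoodC matrix (matrix.length : Int) s ((a : Int), (b : Int)) → t ≤ s := by
            intro s hs
            obtain ⟨e, he, hle, -, -⟩ := h3 s _ hs hvis
            exact le_trans (hmin e he) hle
          have hain : (((a : Int), (b : Int)) : Int × Int) ∈ visited ++ [((a : Int), (b : Int))] :=
            List.mem_append_right _ (List.mem_singleton.2 rfl)
          refine ih _ _ ?_ ?_ ?_ ?_ ?_ ?_ ?_
          · -- fuel
            have hpl : ((pvDirs.filter (fun d : Int × Int =>
                decide (0 ≤ a + d.1 ∧ a + d.1 < (matrix.length : Int) ∧ 0 ≤ b + d.2 ∧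
                  b + d.2 < (matrix.length : Int) ∧
                  (((a + d.1, b + d.2)) : Int × Int) ∉ visited ++ [((a : Int), (b : Int))]))).map
                (fun d : Int × Int =>
                  ((max t (pvVal matrix (a + d.1) (b + d.2)), a + d.1, b + d.2) : Int × Int × Int))).length ≤ 4 := by
              rw [List.length_map]
              exact le_trans (List.length_filter_le _ _) (by simp [pvDirs])
            have hvl : (visited ++ [((a : Int), (b : Int))]).length = visited.length + 1 := by
              simp
            have hcard : (visited ++ [((a : Int), (b : Int))]).length ≤ matrix.length * matrix.length := by
              apply pv_grid_card
              · refine List.Nodup.append hnd (List.nodup_singleton _) ?_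
                intro x hx hx'
                rcases List.mem_cons.1 hx' with rfl | hx''
                · exact hvis hx
                · cases hx''
              · intro p hp
                rcases List.mem_append.1 hp with h | h
                · exact hsub p h
                · rw [List.mem_singleton.1 h]
                  exact hgab
            have hel := List.length_erase_of_mem hmem
            rw [List.length_append, herase]
            rw [hvl] at hcard
            simp only [List.length_append, List.length_cons, List.length_nil]
            omega
          · -- h1 for the new queue
            intro e he
            rcases List.mem_append.1 he with he | he
            · rw [herase] at he
              exact h1 e (List.mem_of_mem_erase he)
            · obtain ⟨d, hdf, rfl⟩ := List.mem_map.1 he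
              obtain ⟨hd, hcond⟩ := List.mem_filter.1 hdf
              have hcond' := of_decide_eq_true hcond
              obtain ⟨c1, c2, c3, c4, c5⟩ := hcond'
              show pvGoodC matrix (matrix.length : Int)
                (max t (pvVal matrix (a + d.1) (b + d.2))) (a + d.1, b + d.2)
              have hgnd : pvInGrid (matrix.length : Int) (a + d.1, b + d.2) := ⟨c1, c2, c3, c4⟩
              refine ⟨hgnd, le_trans hGt.2.1 (le_max_left _ _), le_max_right _ _, ?_⟩
              exact (hGt.2.2.2.mono (fun _ _ hx => pvAdj_mono (le_max_left _ _) hx)).tail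
                ⟨hgab, hgnd, le_trans hGt.2.2.1 (le_max_left _ _), le_max_right _ _,
                  pv_dirs_nbr hd a b⟩
          · -- h3 for the new state
            intro s p hsp hpv
            have hpvis : p ∉ visited := fun h => hpv (List.mem_append_left _ h)
            obtain ⟨e, he, hle, hcell, hrtg⟩ := h3 s p hsp hpvis
            by_cases hecell : (((e.2.1, e.2.2)) : Int × Int) = ((a : Int), (b : Int))
            · -- the popped vertex carried the frontier for p: re-route
              have hts : t ≤ s := le_trans (hmin e he) hle
              have hrtg' : Relation.ReflTransGen (pvAdj matrix (matrix.length : Int) s)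
                  ((a : Int), (b : Int)) p := hecell ▸ hrtg
              obtain ⟨u, w, hau, hu, hw, huw, hwp⟩ := pv_crossing hrtg' hain hpv
              obtain ⟨hgu, hgw, hvu, hvw, hnuw⟩ := huw
              have hGsab : pvGoodC matrix (matrix.length : Int) s ((a : Int), (b : Int)) :=
                pvGoodC_mono hts hGt
              have hGsu : pvGoodC matrix (matrix.length : Int) s u :=
                ⟨hgu, hGsab.2.1, hvu, hGsab.2.2.2.trans hau⟩
              rcases List.mem_append.1 hu with huv | huv
              · have hwn : w ∉ visited := fun h => hw (List.mem_append_left _ h)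
                obtain ⟨e', he', hle', hcell'⟩ := hP u huv w hwn hgw hnuw s hGsu hvw
                refine ⟨e', List.mem_append_left _ ?_, hle', ?_, ?_⟩
                · rw [herase]
                  refine (List.mem_erase_of_ne ?_).2 he'
                  intro heq
                  rw [heq] at hcell'
                  rw [← hcell'] at hw
                  exact hw hain
                · rw [hcell']
                  exact hw
                · rw [hcell']
                  exact hwp
              · have hu_ab : u = ((a : Int), (b : Int)) := List.mem_singleton.1 huv
                rw [hu_ab] at hnuw
                obtain ⟨d, hd, hwd⟩ := pv_nbr_dirs hnuw
                have hwg : pvInGrid (matrix.length : Int) (a + d.1, b + d.2) := hwd ▸ hgw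
                have hwnv : ((a + d.1, b + d.2) : Int × Int) ∉ visited ++ [((a : Int), (b : Int))] :=
                  hwd ▸ hw
                refine ⟨(max t (pvVal matrix (a + d.1) (b + d.2)), a + d.1, b + d.2),
                  List.mem_append_right _ ?_, ?_, hwnv, ?_⟩
                · exact List.mem_map.2 ⟨d, List.mem_filter.2 ⟨hd,
                    decide_eq_true ⟨hwg.1, hwg.2.1, hwg.2.2.1, hwg.2.2.2, hwnv⟩⟩, rfl⟩
                · refine max_le hts ?_
                  rw [hwd] at hvw
                  exact hvw
                · exact hwd ▸ hwp
            · refine ⟨e, List.mem_append_left _ ?_, hle, ?_, hrtg⟩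
              · rw [herase]
                refine (List.mem_erase_of_ne ?_).2 he
                intro heq
                rw [heq] at hecell
                exact hecell rfl
              · intro hmem'
                rcases List.mem_append.1 hmem' with h | h
                · exact hcell h
                · exact hecell (List.mem_singleton.1 h)
          · -- hP for the new state
            intro y hy z hz hzg hznbr s hsy hzv
            have hznv : z ∉ visited := fun h => hz (List.mem_append_left _ h)
            rcases List.mem_append.1 hy with hyv | hyab
            · obtain ⟨e, he, hle, hcell⟩ := hP y hyv z hznv hzg hznbr s hsy hzv
              refine ⟨e, List.mem_append_left _ ?_, hle, hcell⟩
              rw [herase]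
              refine (List.mem_erase_of_ne ?_).2 he
              intro heq
              rw [heq] at hcell
              rw [← hcell] at hz
              exact hz hain
            · have hyab' : y = ((a : Int), (b : Int)) := List.mem_singleton.1 hyab
              rw [hyab'] at hznbr
              obtain ⟨d, hd, hzd⟩ := pv_nbr_dirs hznbr
              have hzg' : pvInGrid (matrix.length : Int) (a + d.1, b + d.2) := hzd ▸ hzg
              have hznv' : ((a + d.1, b + d.2) : Int × Int) ∉ visited ++ [((a : Int), (b : Int))] :=
                hzd ▸ hz
              refine ⟨(max t (pvVal matrix (a + d.1) (b + d.2)), a + d.1, b + d.2),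
                List.mem_append_right _ ?_, ?_, ?_⟩
              · exact List.mem_map.2 ⟨d, List.mem_filter.2 ⟨hd,
                  decide_eq_true ⟨hzg'.1, hzg'.2.1, hzg'.2.2.1, hzg'.2.2.2, hznv'⟩⟩, rfl⟩
              · have hts : t ≤ s := hopt s (hyab' ▸ hsy)
                refine max_le hts ?_
                rw [hzd] at hzv
                exact hzv
              · exact hzd.symm
          · -- nodup
            refine List.Nodup.append hnd (List.nodup_singleton _) ?_
            intro x hx hx'
            rcases List.mem_cons.1 hx' with rfl | hx''
            · exact hvis hx
            · cases hx''
          · -- visited in grid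
            intro p hp
            rcases List.mem_append.1 hp with h | h
            · exact hsub p h
            · rw [List.mem_singleton.1 h]
              exact hgab
          · -- target not yet visited
            intro hmem'
            rcases List.mem_append.1 hmem' with h | h
            · exact htgt h
            · exact htar ((List.mem_singleton.1 h).symm)

lemma pvA_char (matrix : List (List Int)) (hPre : Pre_minimum_time_to_clear_game matrix) :
    pvGood matrix (matrix.length : Int) (minimum_time_to_clear_game matrix) ∧
    ∀ s, pvGood matrix (matrix.length : Int) s → minimum_time_to_clear_game matrix ≤ s := by
  have hn : 1 ≤ matrix.length := List.length_pos_iff.2 hPre.1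
  have g00 : pvInGrid (matrix.length : Int) ((0 : Int), (0 : Int)) := by
    show (0 : Int) ≤ 0 ∧ (0 : Int) < (matrix.length : Int) ∧ (0 : Int) ≤ 0 ∧ (0 : Int) < (matrix.length : Int)
    refine ⟨le_refl _, by omega, le_refl _, by omega⟩
  have hex : ∃ s0, pvGood matrix (matrix.length : Int) s0 :=
    ⟨minimum_time_to_clear_game_alt matrix, (pvAlt_char matrix hPre).1⟩
  have heq : minimum_time_to_clear_game matrix =
      pvALoop matrix (matrix.length : Int) (5 * matrix.length * matrix.length + 5)
        [(pvVal matrix 0 0, 0, 0)] [] := rfl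
  rw [heq]
  refine pvALoop_main matrix hex _ _ _ ?_ ?_ ?_ ?_ List.nodup_nil ?_ List.not_mem_nil
  · simp only [List.length_cons, List.length_nil, List.length_nil]
    rw [Nat.mul_assoc]
    omega
  · intro e he
    rcases List.mem_cons.1 he with rfl | he'
    · exact ⟨g00, le_refl _, le_refl _, Relation.ReflTransGen.refl⟩
    · cases he'
  · intro s p hsp hpv
    exact ⟨(pvVal matrix 0 0, 0, 0), List.mem_cons_self, hsp.2.1, List.not_mem_nil, hsp.2.2.2⟩
  · intro y hy
    cases hy
  · intro p hp
    cases hp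

-- ===== VERDICT (by name: the statement is the Claim_ definition above) =====
theorem minimum_time_to_clear_game_spec : Claim_equal_minimum_time_to_clear_game := by
  intro matrix hDom hPre
  unfold Spec_minimum_time_to_clear_game
  obtain ⟨hga, hma⟩ := pvA_char matrix hPre
  obtain ⟨hgb, hmb⟩ := pvAlt_char matrix hPre
  exact le_antisymm (hma _ hgb) (hmb _ hga)
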